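-- pv_equiv track=rewrite | github.com/extra-p/extradeep | extradeep/extradeep/extradeep/extradeep_instrumenter.py | get_line_numbers_class_instances
-- ===== SOURCE A (Python) =====
-- def get_line_numbers_class_instances(module_imports, code):
--     module_line_numbers = []
--     for x in module_imports:
--         lines = []
--         for j in range(len(code)):
--             if x[0] in code[j]:
--                 if "from" in code[j] or "import" in code[j]:
--                     pass
--                 else:
--                     lines.append(j)
--                     # INFO: on purpose only retrieve the first declaration for now
--                     break
--         module_line_numbers.append((x,lines))
--     return module_line_numbers
-- ===== SOURCE B (Python) =====
-- def get_line_numbers_class_instances(module_imports, code):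
--     results = [[] for _ in module_imports]
--     pending = [(i, x[0]) for i, x in enumerate(module_imports)]
--     for j, line in enumerate(code):
--         if not pending:
--             break
--         if "from" in line or "import" in line:
--             continue
--         still = []
--         for i, key in pending:
--             if key in line:
--                 results[i] = [j]
--             else:
--                 still.append((i, key))
--         pending = still
--     return [(x, results[i]) for i, x in enumerate(module_imports)]
-- ===== Notes on version B (the rewrite author's own statement) =====
-- stated objective: alternative
-- what changed: Instead of A's nested scan (for each module, scan all code lines from the start), B makes a single pass over the code lines, maintaining a pending list of still-unmatched (index, name) entries and fixing each slot at its first matching non-import line, stopping early once nothing is pending.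
-- outside the precondition, e.g. on get_line_numbers_class_instances([()], []): A returns [((), [])], B raises IndexError
import Mathlib
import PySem

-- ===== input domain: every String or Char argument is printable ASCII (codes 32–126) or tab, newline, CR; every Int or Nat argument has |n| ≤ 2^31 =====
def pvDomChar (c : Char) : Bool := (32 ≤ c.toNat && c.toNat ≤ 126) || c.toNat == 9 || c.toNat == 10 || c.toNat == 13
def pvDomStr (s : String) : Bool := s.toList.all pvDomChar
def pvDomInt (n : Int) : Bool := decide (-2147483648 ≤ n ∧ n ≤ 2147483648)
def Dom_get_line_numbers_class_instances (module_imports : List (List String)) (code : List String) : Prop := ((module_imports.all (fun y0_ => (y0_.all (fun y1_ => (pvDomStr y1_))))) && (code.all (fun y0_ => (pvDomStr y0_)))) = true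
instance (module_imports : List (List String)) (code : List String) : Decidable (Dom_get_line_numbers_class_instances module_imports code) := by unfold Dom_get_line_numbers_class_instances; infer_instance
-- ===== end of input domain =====

-- B replaces A's nested scan (for each module, rescan the code from the start) by a single
-- pass over the code lines keeping a pending list of unmatched (index, name) entries.

-- ===== PORT A =====
-- inner 'for j in range(len(code))' loop of A (with the break), for one module entry
def pvAFind (key : String) (code : List String) (j : Int) : List Int :=
  match code with
  | [] => []
  | line :: rest =>
      if PySem.Str.isIn key line then
        if PySem.Str.isIn "from" line || PySem.Str.isIn "import" line then
          pvAFind key rest (j + 1)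
        else [j]
      else pvAFind key rest (j + 1)

-- x[0] is ported as headD ""; Pre_ excludes the inputs on which Python evaluates x[0] on empty x
def get_line_numbers_class_instances (module_imports : List (List String)) (code : List String) : List (List String × List Int) :=
  module_imports.map (fun x => (x, pvAFind (x.headD "") code 0))

-- ===== PORT B =====
-- one pass over the code lines; state: (results slots, pending (index, name) entries)
def pvBLoop (j : Int) (code : List String) (results : List (List Int)) (pending : List (Nat × String)) : List (List Int) :=
  match code with
  | [] => results
  | line :: rest =>
      if pending = [] then results
      else if PySem.Str.isIn "from" line || PySem.Str.isIn "import" line then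
        pvBLoop (j + 1) rest results pending
      else
        let st := pending.foldl
          (fun (acc : List (List Int) × List (Nat × String)) p =>
            if PySem.Str.isIn p.2 line then (acc.1.set p.1 [j], acc.2)
            else (acc.1, acc.2 ++ [p]))
          (results, ([] : List (Nat × String)))
        pvBLoop (j + 1) rest st.1 st.2

def get_line_numbers_class_instances_alt (module_imports : List (List String)) (code : List String) : List (List String × List Int) :=
  let results0 := module_imports.map (fun _ => ([] : List Int))
  let pending0 := module_imports.zipIdx.map (fun p => (p.2, p.1.headD ""))
  let results := pvBLoop 0 code results0 pending0
  module_imports.zipIdx.map (fun p => (p.1, results.getD p.2 []))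

-- ===== PRECONDITION & SPEC =====
-- Pre_ excludes exactly the inputs containing an empty inner list: with nonempty code, Python A
-- raises IndexError on x[0] there; with empty code A returns but B's pending comprehension
-- still evaluates x[0] and raises, so those inputs stay outside the claim.
def Pre_get_line_numbers_class_instances (module_imports : List (List String)) (code : List String) : Prop :=
  ∀ x ∈ module_imports, x ≠ []
instance (module_imports : List (List String)) (code : List String) : Decidable (Pre_get_line_numbers_class_instances module_imports code) := by unfold Pre_get_line_numbers_class_instances; infer_instance

def pvWitness_get_line_numbers_class_instances : List (List String) × List String :=
  ([["os"], ["numpy"]], ["import os", "x = os.path", "y = 1"])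

def Spec_get_line_numbers_class_instances (module_imports : List (List String)) (code : List String) (out : List (List String × List Int)) : Prop := out = get_line_numbers_class_instances_alt module_imports code
instance (module_imports : List (List String)) (code : List String) (out : List (List String × List Int)) : Decidable (Spec_get_line_numbers_class_instances module_imports code out) := by unfold Spec_get_line_numbers_class_instances; infer_instance

-- ===== CLAIM (what is proved, stated in full; the proofs are below) =====
def Claim_equal_get_line_numbers_class_instances : Prop := ∀ (module_imports : List (List String)) (code : List String), Dom_get_line_numbers_class_instances module_imports code → Pre_get_line_numbers_class_instances module_imports code → Spec_get_line_numbers_class_instances module_imports code (get_line_numbers_class_instances module_imports code)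

-- ===== LEMMAS AND PROOFS =====

-- the inner fold of one B step, split into its two components
theorem pvStep_eq (line : String) (j : Int) :
    ∀ (pending : List (Nat × String)) (results : List (List Int)) (acc : List (Nat × String)),
    pending.foldl
      (fun (acc : List (List Int) × List (Nat × String)) p =>
        if PySem.Str.isIn p.2 line then (acc.1.set p.1 [j], acc.2)
        else (acc.1, acc.2 ++ [p]))
      (results, acc)
    = ((pending.filter (fun p => PySem.Str.isIn p.2 line)).foldl (fun r p => r.set p.1 [j]) results,
       acc ++ pending.filter (fun p => !PySem.Str.isIn p.2 line)) := by
  intro pending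
  induction pending with
  | nil => intro results acc; simp
  | cons p rest ih =>
      intro results acc
      rw [List.foldl_cons]
      by_cases h : PySem.Str.isIn p.2 line
      · rw [if_pos h, ih, List.filter_cons_of_pos (by simpa using h),
            List.filter_cons_of_neg (by simpa using h), List.foldl_cons]
      · rw [if_neg h, ih, List.filter_cons_of_neg (by simpa using h),
            List.filter_cons_of_pos (by simpa using h)]
        simp

theorem foldl_set_length (v : List Int) :
    ∀ (l : List (Nat × String)) (results : List (List Int)),
    (l.foldl (fun r p => r.set p.1 v) results).length = results.length := by
  intro l
  induction l with
  | nil => intro results; rfl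
  | cons p rest ih => intro results; simp [List.foldl_cons, ih]

theorem foldl_set_get_of_not_mem (v : List Int) :
    ∀ (l : List (Nat × String)) (results : List (List Int)) (i : Nat),
    (∀ p ∈ l, p.1 ≠ i) →
    (l.foldl (fun r p => r.set p.1 v) results)[i]? = results[i]? := by
  intro l
  induction l with
  | nil => intro results i _; rfl
  | cons p rest ih =>
      intro results i h
      simp only [List.foldl_cons]
      rw [ih _ _ (fun q hq => h q (List.mem_cons_of_mem _ hq))]
      exact List.getElem?_set_ne (h p (List.mem_cons_self) )

theorem foldl_set_get_of_mem (v : List Int) :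
    ∀ (l : List (Nat × String)) (results : List (List Int)) (p : Nat × String),
    p ∈ l → p.1 < results.length →
    (l.foldl (fun r q => r.set q.1 v) results)[p.1]? = some v := by
  intro l
  induction l with
  | nil => intro _ _ h; simp at h
  | cons q rest ih =>
      intro results p hp hlt
      simp only [List.foldl_cons]
      rcases List.mem_cons.mp hp with h | h
      · subst h
        by_cases hm : ∃ r ∈ rest, r.1 = p.1
        · rcases hm with ⟨r, hr, hre⟩
          have h2 := ih (results.set p.1 v) r hr (by rw [List.length_set, hre]; exact hlt)
          rw [hre] at h2
          exact h2
        · push_neg at hm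
          rw [foldl_set_get_of_not_mem v rest _ p.1 hm]
          exact List.getElem?_set_self hlt
      · exact ih _ p h (by simpa using hlt)

-- pvAFind ignores import lines
theorem pvAFind_import (key line : String) (rest : List String) (j : Int)
    (h : (PySem.Str.isIn "from" line || PySem.Str.isIn "import" line) = true) :
    pvAFind key (line :: rest) j = pvAFind key rest (j + 1) := by
  conv_lhs => rw [pvAFind]
  by_cases hk : PySem.Str.isIn key line
  · rw [if_pos hk, if_pos h]
  · rw [if_neg hk]

-- main invariant for B's loop
theorem pvBLoop_get :
    ∀ (code : List String) (j : Int) (results : List (List Int)) (pending : List (Nat × String)),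
    (pending.map Prod.fst).Nodup →
    (∀ p ∈ pending, p.1 < results.length) →
    (∀ p ∈ pending, results[p.1]? = some []) →
    (∀ p ∈ pending, (pvBLoop j code results pending)[p.1]? = some (pvAFind p.2 code j)) ∧
    (∀ i : Nat, (∀ p ∈ pending, p.1 ≠ i) → (pvBLoop j code results pending)[i]? = results[i]?) := by
  intro code
  induction code with
  | nil =>
      intro j results pending _ _ hemp
      refine ⟨fun p hp => ?_, fun i _ => rfl⟩
      simp [pvBLoop, pvAFind, hemp p hp]
  | cons line rest ih =>
      intro j results pending hnd hlt hemp
      by_cases hpe : pending = []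
      · subst hpe
        exact ⟨fun p hp => by simp at hp, fun i _ => by simp [pvBLoop]⟩
      by_cases himp : (PySem.Str.isIn "from" line || PySem.Str.isIn "import" line) = true
      · have hstep : pvBLoop j (line :: rest) results pending
            = pvBLoop (j + 1) rest results pending := by
          conv_lhs => rw [pvBLoop]
          rw [if_neg hpe, if_pos himp]
        have hl := ih (j + 1) results pending hnd hlt hemp
        refine ⟨fun p hp => ?_, fun i hi => ?_⟩
        · rw [pvAFind_import p.2 line rest j himp, hstep]
          exact hl.1 p hp
        · rw [hstep]
          exact hl.2 i hi
      · -- non-import line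
        have hloop : pvBLoop j (line :: rest) results pending
            = pvBLoop (j + 1) rest
                ((pending.filter (fun p => PySem.Str.isIn p.2 line)).foldl (fun r p => r.set p.1 [j]) results)
                (pending.filter (fun p => !PySem.Str.isIn p.2 line)) := by
          conv_lhs => rw [pvBLoop]
          rw [if_neg hpe, if_neg himp, pvStep_eq]
          simp
        set results' := (pending.filter (fun p => PySem.Str.isIn p.2 line)).foldl (fun r p => r.set p.1 [j]) results with hres'
        set pending' := pending.filter (fun p => !PySem.Str.isIn p.2 line) with hpen'
        have hnd' : (pending'.map Prod.fst).Nodup := by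
          exact List.Nodup.sublist (List.Sublist.map Prod.fst (List.filter_sublist)) hnd
        have hlen' : results'.length = results.length := foldl_set_length _ _ _
        have hdistinct : ∀ p ∈ pending', ∀ q ∈ pending.filter (fun p => PySem.Str.isIn p.2 line), q.1 ≠ p.1 := by
          intro p hp q hq heq
          have hp' : p ∈ pending := List.mem_of_mem_filter hp
          have hq' : q ∈ pending := List.mem_of_mem_filter hq
          have hpn : ¬ PySem.Str.isIn p.2 line := by
            have := List.of_mem_filter hp; simpa using this
          have hqy : PySem.Str.isIn q.2 line := by
            have := List.of_mem_filter hq; simpa using this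
          have : q = p := List.inj_on_of_nodup_map hnd hq' hp' heq
          exact hpn (this ▸ hqy)
        have hlt' : ∀ p ∈ pending', p.1 < results'.length := by
          intro p hp; rw [hlen']; exact hlt p (List.mem_of_mem_filter hp)
        have hemp' : ∀ p ∈ pending', results'[p.1]? = some [] := by
          intro p hp
          rw [hres', foldl_set_get_of_not_mem _ _ _ _ (hdistinct p hp)]
          exact hemp p (List.mem_of_mem_filter hp)
        have hihab := ih (j + 1) results' pending' hnd' hlt' hemp'
        refine ⟨fun p hp => ?_, fun i hi => ?_⟩
        · by_cases hm : PySem.Str.isIn p.2 line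
          · -- matched on this line: slot set to [j], untouched afterwards
            have hpm : p ∈ pending.filter (fun p => PySem.Str.isIn p.2 line) := by
              exact List.mem_filter.mpr ⟨hp, by simpa using hm⟩
            have hnotp : ∀ q ∈ pending', q.1 ≠ p.1 := by
              intro q hq heq
              exact hdistinct q hq p hpm heq.symm
            have hfind : pvAFind p.2 (line :: rest) j = [j] := by
              conv_lhs => rw [pvAFind]
              rw [if_pos hm, if_neg himp]
            rw [hfind, hloop, hihab.2 p.1 hnotp, hres',
                foldl_set_get_of_mem _ _ _ p hpm (hlt p hp)]
          · have hpm : p ∈ pending' := List.mem_filter.mpr ⟨hp, by simpa using hm⟩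
            have hfind : pvAFind p.2 (line :: rest) j = pvAFind p.2 rest (j + 1) := by
              conv_lhs => rw [pvAFind]
              rw [if_neg hm]
            rw [hfind, hloop]
            exact hihab.1 p hpm
        · have hi' : ∀ p ∈ pending', p.1 ≠ i := fun p hp => hi p (List.mem_of_mem_filter hp)
          have hi'' : ∀ p ∈ pending.filter (fun p => PySem.Str.isIn p.2 line), p.1 ≠ i :=
            fun p hp => hi p (List.mem_of_mem_filter hp)
          rw [hloop, hihab.2 i hi', hres', foldl_set_get_of_not_mem _ _ _ _ hi'']

-- ===== VERDICT (by name: the statement is the Claim_ definition above) =====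
theorem get_line_numbers_class_instances_spec : Claim_equal_get_line_numbers_class_instances := by
  intro mi code _ _
  unfold Spec_get_line_numbers_class_instances
  unfold get_line_numbers_class_instances get_line_numbers_class_instances_alt
  simp only []
  set results0 := mi.map (fun _ => ([] : List Int)) with hres0
  set pending0 := mi.zipIdx.map (fun p => (p.2, p.1.headD "")) with hpen0
  have hnd : (pending0.map Prod.fst).Nodup := by
    rw [hpen0]
    simpa [List.map_map, Function.comp_def] using List.nodup_zipIdx_map_snd mi
  have hlt : ∀ p ∈ pending0, p.1 < results0.length := by
    intro p hp
    rcases List.mem_map.mp hp with ⟨q, hq, hqe⟩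
    have h2 := List.snd_lt_of_mem_zipIdx hq
    simp only [hres0, List.length_map, ← hqe]
    omega
  have hemp : ∀ p ∈ pending0, results0[p.1]? = some [] := by
    intro p hp
    have hl := hlt p hp
    rw [hres0, List.getElem?_map]
    rw [hres0, List.length_map] at hl
    simp [List.getElem?_eq_getElem hl]
  have hmain := pvBLoop_get code 0 results0 pending0 hnd hlt hemp
  apply List.ext_getElem
  · simp
  · intro n h1 h2
    rw [List.length_map] at h1
    simp only [List.getElem_map, List.getElem_zipIdx]
    refine Prod.ext rfl ?_
    have hmem : ((mi[n], n) : List String × ℕ) ∈ mi.zipIdx := by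
      rw [List.mk_mem_zipIdx_iff_getElem?]
      exact List.getElem?_eq_getElem h1
    have hpmem : ((n, (mi[n]).headD "") : ℕ × String) ∈ pending0 := by
      rw [hpen0]
      exact List.mem_map.mpr ⟨(mi[n], n), hmem, rfl⟩
    have := hmain.1 _ hpmem
    simp only at this
    simp only [Nat.zero_add]
    rw [List.getD_eq_getElem?_getD, this]
    simp
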